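-- pv_equiv track=rewrite | github.com/adarshtr/neetcode-150 | 36-valid-sudoku/36.py | isValidMatrix
-- ===== SOURCE A (Python) =====
-- def isValidMatrix(board,x1,y1,x2,y2):
--     numHash = {}
--     for i in range(x1,x2+1):
--         for j in range(y1,y2+1):
--             if board[i][j] != ".":
--                 if board[i][j] in numHash:
--                     return False
--                 else:
--                     numHash[board[i][j]] = True
--     return True
-- ===== SOURCE B (Python) =====
-- def isValidMatrix(board, x1, y1, x2, y2):
--     # Brute-force pairwise scan: a non-'.' cell makes the region invalid exactly
--     # when the same value already occurred at an earlier region position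
--     # (row-major order); no hash set is kept.
--     for i in range(x1, x2 + 1):
--         for j in range(y1, y2 + 1):
--             v = board[i][j]
--             if v == ".":
--                 continue
--             for pi in range(x1, i + 1):
--                 for pj in range(y1, j if pi == i else y2 + 1):
--                     if board[pi][pj] == v:
--                         return False
--     return True
-- ===== Notes on version B (the rewrite author's own statement) =====
-- stated objective: alternative
-- what changed: Replaces A's incremental hash-dict guard (build numHash, test membership, insert) by a memoryless brute-force pairwise scan: for each non-'.' cell the region is re-scanned over all earlier row-major positions for an equal value, so no auxiliary container exists at all.
-- outside the precondition, e.g. on isValidMatrix([['1', '1']], 0, 0, 0, 5): A returns False, B returns False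
import Mathlib
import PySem

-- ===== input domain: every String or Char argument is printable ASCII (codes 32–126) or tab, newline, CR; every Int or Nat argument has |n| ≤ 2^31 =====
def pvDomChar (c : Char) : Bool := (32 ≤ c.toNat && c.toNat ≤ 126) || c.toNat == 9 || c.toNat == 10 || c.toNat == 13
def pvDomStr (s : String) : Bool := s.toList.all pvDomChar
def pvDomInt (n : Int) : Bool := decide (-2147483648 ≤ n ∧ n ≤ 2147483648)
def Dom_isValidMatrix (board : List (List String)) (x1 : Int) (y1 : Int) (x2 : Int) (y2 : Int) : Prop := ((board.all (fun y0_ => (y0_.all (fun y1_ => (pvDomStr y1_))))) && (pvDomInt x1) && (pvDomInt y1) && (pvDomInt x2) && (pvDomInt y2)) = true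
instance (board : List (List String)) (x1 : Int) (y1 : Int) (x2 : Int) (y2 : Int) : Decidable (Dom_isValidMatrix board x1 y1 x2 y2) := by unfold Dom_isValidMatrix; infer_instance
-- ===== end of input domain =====

-- B replaces A's incremental hash-dict guard by a memoryless brute-force pairwise scan
-- (each non-"." cell is compared against every earlier region cell); equivalent in value.


-- ===== PORT A =====
-- inner loop over j: returns none when A's `return False` fires, else the updated dict
def pvAInner (row : List String) (js : List Int) (numHash : PySem.Dict String Bool) :
    Option (PySem.Dict String Bool) :=
  match js with
  | [] => some numHash
  | j :: rest =>
    let v := (PySem.List.pyGet? row j).getD ""   -- total form; Pre_ guarantees the index is in range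
    if v ≠ "." then
      if numHash.contains v then none
      else pvAInner row rest (numHash.insert v true)
    else pvAInner row rest numHash

-- outer loop over i
def pvAOuter (board : List (List String)) (is : List Int) (y1 y2 : Int)
    (numHash : PySem.Dict String Bool) : Bool :=
  match is with
  | [] => true
  | i :: rest =>
    let row := (PySem.List.pyGet? board i).getD []   -- total form; Pre_ guarantees the index is in range
    match pvAInner row (PySem.List.pyRange y1 (y2+1) 1) numHash with
    | none => false
    | some d' => pvAOuter board rest y1 y2 d'

def isValidMatrix (board : List (List String)) (x1 : Int) (y1 : Int) (x2 : Int) (y2 : Int) : Bool :=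
  pvAOuter board (PySem.List.pyRange x1 (x2+1) 1) y1 y2 PySem.Dict.empty

-- ===== PORT B =====
-- the inner pairwise re-scan: does v occur at an earlier region position than (i, j)?
def pvBDup (board : List (List String)) (x1 y1 y2 : Int) (i j : Int) (v : String) : Bool :=
  (PySem.List.pyRange x1 (i+1) 1).any (fun pi =>
    let prow := (PySem.List.pyGet? board pi).getD []   -- total form; Pre_ guarantees the index is in range
    (PySem.List.pyRange y1 (if pi = i then j else y2 + 1) 1).any (fun pj =>
      ((PySem.List.pyGet? prow pj).getD "") == v))

def isValidMatrix_alt (board : List (List String)) (x1 : Int) (y1 : Int) (x2 : Int) (y2 : Int) : Bool :=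
  (PySem.List.pyRange x1 (x2+1) 1).all (fun i =>
    let row := (PySem.List.pyGet? board i).getD []   -- total form; Pre_ guarantees the index is in range
    (PySem.List.pyRange y1 (y2+1) 1).all (fun j =>
      let v := (PySem.List.pyGet? row j).getD ""
      if v == "." then true
      else !(pvBDup board x1 y1 y2 i j v)))

-- ===== PRECONDITION & SPEC =====
-- Pre_ excludes the inputs on which some visited region index is out of range: there Python A raises
-- IndexError at the first out-of-range access (B raises at the same access; when a duplicate occurs
-- even earlier, both A and B return False there, so those excluded inputs still agree).
def Pre_isValidMatrix (board : List (List String)) (x1 : Int) (y1 : Int) (x2 : Int) (y2 : Int) : Prop :=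
  x2 < x1 ∨ y2 < y1 ∨
  (-(board.length : Int) ≤ x1 ∧ x2 < (board.length : Int) ∧
    ∀ i ∈ PySem.List.pyRange x1 (x2+1) 1,
      -(((PySem.List.pyGet? board i).getD []).length : Int) ≤ y1 ∧
      y2 < (((PySem.List.pyGet? board i).getD []).length : Int))

instance (board : List (List String)) (x1 : Int) (y1 : Int) (x2 : Int) (y2 : Int) : Decidable (Pre_isValidMatrix board x1 y1 x2 y2) := by unfold Pre_isValidMatrix; infer_instance

def pvWitness_isValidMatrix : List (List String) × Int × Int × Int × Int :=
  ([["1", "2"], ["3", "."]], 0, 0, 1, 1)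

def Spec_isValidMatrix (board : List (List String)) (x1 : Int) (y1 : Int) (x2 : Int) (y2 : Int) (out : Bool) : Prop := out = isValidMatrix_alt board x1 y1 x2 y2
instance (board : List (List String)) (x1 : Int) (y1 : Int) (x2 : Int) (y2 : Int) (out : Bool) : Decidable (Spec_isValidMatrix board x1 y1 x2 y2 out) := by unfold Spec_isValidMatrix; infer_instance

-- ===== CLAIM (what is proved, stated in full; the proofs are below) =====
def Claim_equal_isValidMatrix : Prop := ∀ (board : List (List String)) (x1 : Int) (y1 : Int) (x2 : Int) (y2 : Int), Dom_isValidMatrix board x1 y1 x2 y2 → Pre_isValidMatrix board x1 y1 x2 y2 → Spec_isValidMatrix board x1 y1 x2 y2 (isValidMatrix board x1 y1 x2 y2)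

-- ===== LEMMAS AND PROOFS =====

-- "the cell is not a dot" as a Bool predicate
def pvF : String → Bool := fun v => !(v == ".")

-- the value A and B read at region position (i, j) (total form)
def pvVal (board : List (List String)) (i j : Int) : String :=
  (PySem.List.pyGet? ((PySem.List.pyGet? board i).getD []) j).getD ""

-- the sequence of non-"." cells one row contributes (A's inner loop walks it)
def pvCells (row : List String) (js : List Int) : List String :=
  js.filterMap (fun j =>
    let v := (PySem.List.pyGet? row j).getD ""
    if v ≠ "." then some v else none)

-- A's guard-and-insert loop, abstracted over the flat cell sequence
def pvScan (vs : List String) (d : PySem.Dict String Bool) : Option (PySem.Dict String Bool) :=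
  match vs with
  | [] => some d
  | v :: rest => if d.contains v then none else pvScan rest (d.insert v true)

theorem pvAInner_eq_scan (row : List String) (js : List Int) (d : PySem.Dict String Bool) :
    pvAInner row js d = pvScan (pvCells row js) d := by
  induction js generalizing d with
  | nil => rfl
  | cons j rest ih =>
    by_cases hv : ((PySem.List.pyGet? row j).getD "") = "."
    · simp [pvAInner, pvCells, hv, ih]
    · simp [pvAInner, pvCells, hv, ih, pvScan]

theorem pvScan_append (xs ys : List String) (d : PySem.Dict String Bool) :
    pvScan (xs ++ ys) d = (pvScan xs d).bind (fun d' => pvScan ys d') := by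
  induction xs generalizing d with
  | nil => rfl
  | cons x rest ih =>
    simp only [List.cons_append, pvScan]
    split <;> simp [ih]

theorem pvAOuter_eq_scan (board : List (List String)) (is : List Int) (y1 y2 : Int)
    (d : PySem.Dict String Bool) :
    pvAOuter board is y1 y2 d =
      (pvScan (is.flatMap (fun i =>
        pvCells ((PySem.List.pyGet? board i).getD []) (PySem.List.pyRange y1 (y2+1) 1))) d).isSome := by
  induction is generalizing d with
  | nil => rfl
  | cons i rest ih =>
    simp only [pvAOuter, List.flatMap_cons, pvScan_append, pvAInner_eq_scan]
    cases pvScan (pvCells ((PySem.List.pyGet? board i).getD []) (PySem.List.pyRange y1 (y2+1) 1)) d with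
    | none => rfl
    | some d' => simpa using ih d'

theorem pvScan_isSome_iff (vs : List String) (d : PySem.Dict String Bool) :
    (pvScan vs d).isSome = true ↔ (vs.Nodup ∧ ∀ v ∈ vs, d.contains v = false) := by
  induction vs generalizing d with
  | nil => simp [pvScan]
  | cons v rest ih =>
    simp only [pvScan]
    by_cases h : d.contains v = true
    · rw [if_pos h]
      simp only [Option.isSome_none, Bool.false_eq_true, false_iff]
      rintro ⟨-, hall⟩
      have := hall v (by simp)
      rw [this] at h
      cases h
    · have hfalse : d.contains v = false := by
        cases hc : d.contains v
        · rfl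
        · exact absurd hc h
      rw [if_neg h, ih]
      constructor
      · rintro ⟨hn, hall⟩
        have hvr : v ∉ rest := by
          intro hmem
          have h2 := hall v hmem
          rw [PySem.Dict.contains_insert] at h2
          simp at h2
        refine ⟨List.nodup_cons.mpr ⟨hvr, hn⟩, ?_⟩
        intro w hw
        rcases List.mem_cons.mp hw with rfl | hw'
        · exact hfalse
        · have h2 := hall w hw'
          rw [PySem.Dict.contains_insert] at h2
          exact (Bool.or_eq_false_iff.mp h2).2
      · rintro ⟨hn, hall⟩
        rcases List.nodup_cons.mp hn with ⟨hvr, hn'⟩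
        refine ⟨hn', ?_⟩
        intro w hw
        rw [PySem.Dict.contains_insert, Bool.or_eq_false_iff]
        refine ⟨?_, hall w (List.mem_cons_of_mem _ hw)⟩
        simp only [beq_eq_false_iff_ne, ne_eq]
        rintro rfl; exact hvr hw

-- one row's cell sequence, as filter-of-map over the values read
theorem pvCells_eq_filter (board : List (List String)) (i : Int) (js : List Int) :
    pvCells ((PySem.List.pyGet? board i).getD []) js = (js.map (pvVal board i)).filter pvF := by
  induction js with
  | nil => rfl
  | cons j rest ih =>
    by_cases hv : (PySem.List.pyGet? ((PySem.List.pyGet? board i).getD []) j).getD "" = "."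
    · simp [pvCells, hv, pvF, pvVal] at ih ⊢
      exact ih
    · have hb : ((PySem.List.pyGet? ((PySem.List.pyGet? board i).getD []) j).getD "" == ".") = false := by
        simpa using hv
      simp [pvCells, hv, hb, pvF, pvVal] at ih ⊢
      exact ih

-- filter-of-map rewritten as a flatMap of singletons (so the generic Nodup lemma applies per row)
theorem pvFilter_map_eq_flatMap (g : Int → String) (l : List Int) :
    (l.map g).filter pvF = l.flatMap (fun j => if pvF (g j) = true then [g j] else []) := by
  induction l with
  | nil => rfl
  | cons j rest ih =>
    by_cases h : pvF (g j) = true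
    · simp [h, ih]
    · simp [h, ih]

-- GENERIC: Nodup of a flatMap over an increasing integer range ↔ each block Nodup and
-- each block disjoint from every earlier block
theorem pvG_aux (h : Int → List String) (a : Int) (n : Nat) :
    ((PySem.List.pyRange a (a + n) 1).flatMap h).Nodup ↔
      ∀ i ∈ PySem.List.pyRange a (a + n) 1, (h i).Nodup ∧
        ∀ v ∈ h i, ∀ p ∈ PySem.List.pyRange a i 1, v ∉ h p := by
  induction n with
  | zero => simp [PySem.List.pyRange_one_eq_nil (le_refl a)]
  | succ n ih =>
    have hb : (a : Int) + (n + 1 : Nat) = (a + n) + 1 := by push_cast; ring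
    rw [hb, PySem.List.pyRange_one_succ_right (by omega : (a : Int) ≤ a + n)]
    simp only [List.flatMap_append, List.flatMap_cons, List.flatMap_nil, List.append_nil,
      List.nodup_append, List.mem_append, List.mem_singleton]
    constructor
    · rintro ⟨h1, h2, h3⟩ i hi
      rcases hi with hi | rfl
      · exact (ih.mp h1) i hi
      · refine ⟨h2, ?_⟩
        intro v hv p hp hvp
        exact h3 v (List.mem_flatMap.mpr ⟨p, hp, hvp⟩) v hv rfl
    · intro hall
      refine ⟨ih.mpr (fun i hi => hall i (Or.inl hi)), (hall _ (Or.inr rfl)).1, ?_⟩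
      intro v hv w hw hvw
      rcases List.mem_flatMap.mp hv with ⟨p, hp, hvp⟩
      exact (hall _ (Or.inr rfl)).2 w hw p hp (hvw ▸ hvp)
theorem pvG (h : Int → List String) (a b : Int) :
    ((PySem.List.pyRange a b 1).flatMap h).Nodup ↔
      ∀ i ∈ PySem.List.pyRange a b 1, (h i).Nodup ∧
        ∀ v ∈ h i, ∀ p ∈ PySem.List.pyRange a i 1, v ∉ h p := by
  by_cases hab : a ≤ b
  · have hb : b = a + (b - a).toNat := by omega
    rw [hb]; exact pvG_aux h a (b - a).toNat
  · rw [PySem.List.pyRange_one_eq_nil (by omega)]; simp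

-- the pairwise re-scan, characterized as membership in the earlier region values
theorem pvBDup_iff (board : List (List String)) (x1 y1 y2 i j : Int) (v : String)
    (hx : x1 ≤ i) :
    pvBDup board x1 y1 y2 i j v = true ↔
      ((∃ a ∈ PySem.List.pyRange x1 i 1, ∃ q ∈ PySem.List.pyRange y1 (y2+1) 1, pvVal board a q = v) ∨
       ∃ q ∈ PySem.List.pyRange y1 j 1, pvVal board i q = v) := by
  unfold pvBDup
  rw [PySem.List.pyRange_one_succ_right hx]
  simp only [List.any_append, List.any_cons, List.any_nil, Bool.or_false, Bool.or_eq_true,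
    List.any_eq_true, beq_iff_eq]
  constructor
  · rintro (⟨a, ha, q, hq, hv⟩ | ⟨q, hq, hv⟩)
    · have hlt := (PySem.List.mem_pyRange_one.mp ha).2
      rw [if_neg (by omega)] at hq
      exact Or.inl ⟨a, ha, q, hq, hv⟩
    · exact Or.inr ⟨q, hq, hv⟩
  · rintro (⟨a, ha, q, hq, hv⟩ | ⟨q, hq, hv⟩)
    · have hlt := (PySem.List.mem_pyRange_one.mp ha).2
      exact Or.inl ⟨a, ha, q, by rw [if_neg (by omega)]; exact hq, hv⟩
    · exact Or.inr ⟨q, hq, hv⟩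

-- membership in a filtered row
theorem pvMem_filterRow (g : Int → String) (js : List Int) (v : String) :
    v ∈ (js.map g).filter pvF ↔ (∃ q ∈ js, g q = v) ∧ v ≠ "." := by
  simp only [List.mem_filter, List.mem_map, pvF]
  constructor
  · rintro ⟨⟨q, hq, rfl⟩, hf⟩
    exact ⟨⟨q, hq, rfl⟩, by simpa using hf⟩
  · rintro ⟨⟨q, hq, rfl⟩, hne⟩
    exact ⟨⟨q, hq, rfl⟩, by simpa using hne⟩

-- membership in a singleton block
theorem pvMem_sing (g : Int → String) (p : Int) (v : String) :
    v ∈ (if pvF (g p) = true then [g p] else []) ↔ g p = v ∧ v ≠ "." := by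
  by_cases h : pvF (g p) = true
  · have hne : g p ≠ "." := by simpa [pvF] using h
    rw [if_pos h]
    constructor
    · intro hv
      have hv' := List.mem_singleton.mp hv
      exact ⟨hv'.symm, by rw [hv']; exact hne⟩
    · rintro ⟨rfl, -⟩; exact List.mem_singleton.mpr rfl
  · have hdot : g p = "." := by simpa [pvF] using h
    rw [if_neg h]
    constructor
    · intro hv; exact absurd hv (List.not_mem_nil)
    · rintro ⟨hgv, hne2⟩; exact absurd (hdot ▸ hgv).symm hne2

-- B, characterized positionally
theorem pvB_iff (board : List (List String)) (x1 y1 x2 y2 : Int) :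
    isValidMatrix_alt board x1 y1 x2 y2 = true ↔
      ∀ i ∈ PySem.List.pyRange x1 (x2+1) 1, ∀ j ∈ PySem.List.pyRange y1 (y2+1) 1,
        pvVal board i j ≠ "." →
          (¬ ∃ a ∈ PySem.List.pyRange x1 i 1, ∃ q ∈ PySem.List.pyRange y1 (y2+1) 1,
              pvVal board a q = pvVal board i j) ∧
          ¬ ∃ q ∈ PySem.List.pyRange y1 j 1, pvVal board i q = pvVal board i j := by
  unfold isValidMatrix_alt
  simp only [List.all_eq_true]
  constructor
  · intro hall i hi j hj hne
    have hx : x1 ≤ i := (PySem.List.mem_pyRange_one.mp hi).1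
    have := hall i hi j hj
    rw [if_neg (by simpa using hne)] at this
    have hd : pvBDup board x1 y1 y2 i j (pvVal board i j) = false := by
      simpa [pvVal] using this
    have := (pvBDup_iff board x1 y1 y2 i j (pvVal board i j) hx).not
    rw [hd] at this
    simp only [Bool.false_eq_true, not_false_iff, true_iff] at this
    push Not at this
    constructor
    · rintro ⟨a, ha, q, hq, hv⟩; exact this.1 a ha q hq hv
    · rintro ⟨q, hq, hv⟩; exact this.2 q hq hv
  · intro hall i hi j hj
    have hx : x1 ≤ i := (PySem.List.mem_pyRange_one.mp hi).1
    by_cases hne : pvVal board i j = "."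
    · rw [if_pos (by simpa [pvVal] using hne)]
    · rw [if_neg (by simpa [pvVal] using hne)]
      have := hall i hi j hj hne
      have hd : pvBDup board x1 y1 y2 i j (pvVal board i j) = false := by
        rcases hb : pvBDup board x1 y1 y2 i j (pvVal board i j)
        · rfl
        · rcases (pvBDup_iff board x1 y1 y2 i j (pvVal board i j) hx).mp hb with hc | hc
          · exact absurd hc this.1
          · exact absurd hc this.2
      simpa [pvVal] using congrArg (fun b => !b) hd
-- the flat region cell list
def pvAllCells (board : List (List String)) (x1 y1 x2 y2 : Int) : List String :=
  (PySem.List.pyRange x1 (x2+1) 1).flatMap (fun i =>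
    ((PySem.List.pyRange y1 (y2+1) 1).map (pvVal board i)).filter pvF)

-- A = B, both ↔ Nodup of the flat region cell list
theorem pvA_iff (board : List (List String)) (x1 y1 x2 y2 : Int) :
    isValidMatrix board x1 y1 x2 y2 = true ↔ (pvAllCells board x1 y1 x2 y2).Nodup := by
  unfold isValidMatrix pvAllCells
  rw [pvAOuter_eq_scan, pvScan_isSome_iff]
  constructor
  · rintro ⟨hn, -⟩
    have : (fun i => pvCells ((PySem.List.pyGet? board i).getD []) (PySem.List.pyRange y1 (y2+1) 1))
         = (fun i => ((PySem.List.pyRange y1 (y2+1) 1).map (pvVal board i)).filter pvF) := by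
      funext i; exact pvCells_eq_filter board i _
    rwa [this] at hn
  · intro hn
    refine ⟨?_, fun v _ => PySem.Dict.contains_empty v⟩
    have : (fun i => pvCells ((PySem.List.pyGet? board i).getD []) (PySem.List.pyRange y1 (y2+1) 1))
         = (fun i => ((PySem.List.pyRange y1 (y2+1) 1).map (pvVal board i)).filter pvF) := by
      funext i; exact pvCells_eq_filter board i _
    rwa [this]

theorem pvB_iff_nodup (board : List (List String)) (x1 y1 x2 y2 : Int) :
    isValidMatrix_alt board x1 y1 x2 y2 = true ↔ (pvAllCells board x1 y1 x2 y2).Nodup := by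
  rw [pvB_iff, pvAllCells, pvG]
  constructor
  · intro hall i hi
    constructor
    · -- row i has no inner duplicate
      rw [pvFilter_map_eq_flatMap, pvG]
      intro j hj
      refine ⟨by split <;> simp, ?_⟩
      intro v hv p hp hvp
      rcases (pvMem_sing _ j v).mp hv with ⟨hgv, hne⟩
      rcases (pvMem_sing _ p v).mp hvp with ⟨hgp, -⟩
      have := (hall i hi j hj (by rw [hgv]; exact hne)).2
      exact this ⟨p, hp, by rw [hgp, hgv]⟩
    · -- row i disjoint from every earlier row
      intro v hv p hp hvp
      rcases (pvMem_filterRow _ _ v).mp hv with ⟨⟨j, hj, hgv⟩, hne⟩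
      rcases (pvMem_filterRow _ _ v).mp hvp with ⟨⟨q, hq, hgq⟩, -⟩
      have := (hall i hi j hj (by rw [hgv]; exact hne)).1
      exact this ⟨p, hp, q, hq, by rw [hgq, hgv]⟩
  · intro hall i hi j hj hne
    obtain ⟨hrow, hcross⟩ := hall i hi
    constructor
    · rintro ⟨a, ha, q, hq, hv⟩
      exact hcross (pvVal board i j)
        ((pvMem_filterRow _ _ _).mpr ⟨⟨j, hj, rfl⟩, hne⟩) a ha
        ((pvMem_filterRow _ _ _).mpr ⟨⟨q, hq, hv⟩, hne⟩)
    · rintro ⟨q, hq, hv⟩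
      rw [pvFilter_map_eq_flatMap, pvG] at hrow
      have := (hrow j hj).2
      exact this (pvVal board i j) ((pvMem_sing _ j _).mpr ⟨rfl, hne⟩) q hq
        ((pvMem_sing _ q _).mpr ⟨hv, hne⟩)

-- ===== VERDICT (by name: the statement is the Claim_ definition above) =====
theorem isValidMatrix_spec : Claim_equal_isValidMatrix := by
  intro board x1 y1 x2 y2 _hdom _hpre
  unfold Spec_isValidMatrix
  rw [Bool.eq_iff_iff, pvA_iff, pvB_iff_nodup]
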